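-- pv_equiv track=rewrite | github.com/davidsampimon/aoc | 2022/day16/paste_part2.py | set_distance_nonempty
-- ===== SOURCE A (Python) =====
-- from collections import deque
--
-- def set_distance_nonempty(valves, tunnels):
--     dists = {}
--     nonempty = []
--
--     for valve in valves:
--         if valve != "AA" and not valves[valve]:
--             continue
--
--         if valve != "AA":
--             nonempty.append(valve)
--
--         dists[valve] = {valve: 0, "AA": 0}
--         visited = {valve}
--
--         queue = deque([(0, valve)])
--
--         while queue:
--             distance, position = queue.popleft()
--             for neighbor in tunnels[position]:
--                 if neighbor in visited:
--                     continue
--                 visited.add(neighbor)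
--                 if valves[neighbor]:
--                     dists[valve][neighbor] = distance + 1
--                 queue.append((distance + 1, neighbor))
--
--         del dists[valve][valve]
--         if valve != "AA":
--             del dists[valve]["AA"]
--
--     return dists, nonempty
-- ===== SOURCE B (Python) =====
-- def set_distance_nonempty(valves, tunnels):
--     # Round-based fixed-point relaxation: no queue, no frontier, no visited set.
--     # The growing distance dict itself is the "visited" structure; we repeatedly
--     # sweep a snapshot of it, attaching unseen neighbours at du + 1, until a
--     # whole sweep adds nothing.  The per-source map is a final filter.
--     dists = {}
--     for s in valves:
--         if s == "AA" or valves[s]: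
--             dist = {s: 0}
--             while True:
--                 added = False
--                 for u, du in list(dist.items()):
--                     for v in tunnels[u]:
--                         if v not in dist:
--                             dist[v] = du + 1
--                             added = True
--                 if not added:
--                     break
--             dists[s] = {v: d for v, d in dist.items()
--                         if v != s and v != "AA" and valves[v]}
--     nonempty = [v for v in valves if v != "AA" and valves[v]]
--     return dists, nonempty
-- ===== Notes on version B (the rewrite author's own statement) =====
-- stated objective: alternative
-- what changed: B abandons BFS entirely: per source it computes distances by a Bellman-Ford-style fixed-point relaxation -- repeatedly sweep a snapshot of the growing distance dict, attaching each unseen neighbour at du+1, until a whole sweep adds nothing (no queue, no frontier, no visited set; the dict itself is the visited structure) -- and the per-source map is a single final filter of that full distance dict instead of being maintained and patched during the search.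
-- outside the precondition, e.g. on set_distance_nonempty({'AA': 0, 'BB': 0}, {'AA': []}): A returns ({'AA': {}}, []), B returns ({'AA': {}}, [])
import Mathlib
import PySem

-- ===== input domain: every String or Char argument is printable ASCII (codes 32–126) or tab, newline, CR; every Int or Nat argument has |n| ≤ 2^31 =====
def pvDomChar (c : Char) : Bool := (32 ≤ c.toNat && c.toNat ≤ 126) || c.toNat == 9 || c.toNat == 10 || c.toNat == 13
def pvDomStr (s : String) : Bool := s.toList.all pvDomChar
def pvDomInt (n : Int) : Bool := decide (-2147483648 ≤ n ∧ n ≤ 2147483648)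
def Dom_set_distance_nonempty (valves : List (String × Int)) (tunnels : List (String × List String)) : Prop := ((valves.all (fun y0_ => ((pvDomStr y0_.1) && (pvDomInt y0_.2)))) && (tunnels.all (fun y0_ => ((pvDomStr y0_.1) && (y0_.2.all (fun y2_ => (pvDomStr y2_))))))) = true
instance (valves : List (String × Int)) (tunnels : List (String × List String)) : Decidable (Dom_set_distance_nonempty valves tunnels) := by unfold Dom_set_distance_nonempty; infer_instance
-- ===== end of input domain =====

-- B replaces A's per-source queue BFS by a round-based fixed-point relaxation (sweep the growing
-- distance dict until a sweep adds nothing) with the per-source map obtained by one final filter.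

-- ===== PORT A =====
-- total-adjacency size, used only as a termination fuel bound (the Python loops terminate
-- because the visited structure only grows; the fuel is provably never exhausted)
def pvFuel (td : PySem.Dict String (List String)) : Nat :=
  (td.items.map (fun kv => kv.2.length)).sum

-- inner `for neighbor in tunnels[position]` loop; state (visited, dists[valve], queue)
def pvA_adj (vd : PySem.Dict String Int) (d : Int) :
    List String → PySem.Set String → PySem.Dict String Int → List (Int × String) →
    PySem.Set String × PySem.Dict String Int × List (Int × String)
  | [], V, dist, q => (V, dist, q)
  | n :: ns, V, dist, q =>
    if PySem.Set.contains V n then pvA_adj vd d ns V dist q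
    else pvA_adj vd d ns (PySem.Set.add V n)
      (if vd.getD n 0 ≠ 0 then dist.insert n (d + 1) else dist)
      (q ++ [(d + 1, n)])

-- `while queue:` deque loop; `tunnels[position]` raises KeyError on a missing key — excluded by
-- Pre_, so the getD default is never consulted on admitted inputs
def pvA_bfs (vd : PySem.Dict String Int) (td : PySem.Dict String (List String)) :
    Nat → PySem.Set String → PySem.Dict String Int → List (Int × String) → PySem.Dict String Int
  | _, _, dist, [] => dist
  | 0, _, dist, _ :: _ => dist  -- fuel guard only; never reached (see pvMainSim)
  | fuel + 1, V, dist, (d, p) :: rest =>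
    let s := pvA_adj vd d (td.getD p []) V dist rest
    pvA_bfs vd td fuel s.1 s.2.1 s.2.2

def set_distance_nonempty (valves : List (String × Int)) (tunnels : List (String × List String)) : (List (String × List (String × Int))) × List String :=
  let vd := PySem.Dict.ofList valves
  let td := PySem.Dict.ofList tunnels
  let res := vd.keys.foldl
    (fun (st : PySem.Dict String (PySem.Dict String Int) × List String) valve =>
      if valve ≠ "AA" ∧ vd.getD valve 0 = 0 then st
      else
        let ne' := if valve ≠ "AA" then st.2 ++ [valve] else st.2
        let dist0 := (PySem.Dict.empty.insert valve (0 : Int)).insert "AA" 0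
        let dist := pvA_bfs vd td (1 + pvFuel td) (PySem.Set.ofList [valve]) dist0 [(0, valve)]
        let dist := dist.erase valve
        let dist := if valve ≠ "AA" then dist.erase "AA" else dist
        (st.1.insert valve dist, ne'))
    (PySem.Dict.empty, [])
  (res.1.items.map (fun kv => (kv.1, kv.2.items)), res.2)

-- ===== PORT B =====
-- inner `for v in tunnels[u]` loop of one sweep; state (dist, added)
def pvS_inner (du : Int) : List String → PySem.Dict String Int → Bool → PySem.Dict String Int × Bool
  | [], dist, added => (dist, added)
  | v :: vs, dist, added =>
    if dist.contains v then pvS_inner du vs dist added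
    else pvS_inner du vs (dist.insert v (du + 1)) true

-- `for u, du in list(dist.items())` — one sweep over the snapshot
def pvS_sweep (td : PySem.Dict String (List String)) :
    List (String × Int) → PySem.Dict String Int → Bool → PySem.Dict String Int × Bool
  | [], dist, added => (dist, added)
  | (u, du) :: rest, dist, added =>
    let r := pvS_inner du (td.getD u []) dist added
    pvS_sweep td rest r.1 r.2

-- `while True:` sweep-until-no-change loop (fuel is a termination guard only; never exhausted)
def pvS_fix (td : PySem.Dict String (List String)) :
    Nat → PySem.Dict String Int → PySem.Dict String Int
  | 0, dist => dist  -- fuel guard only; never reached (see pvFixSim)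
  | fuel + 1, dist =>
    let r := pvS_sweep td dist.items dist false
    if r.2 then pvS_fix td fuel r.1 else r.1

-- the dict comprehension's filter condition
def pvQ (vd : PySem.Dict String Int) (s : String) (p : String × Int) : Bool :=
  decide (p.1 ≠ s ∧ p.1 ≠ "AA" ∧ vd.getD p.1 0 ≠ 0)

-- `dists[s] = {v: d for v, d in dist.items() if v != s and v != "AA" and valves[v]}`
def pvS_store (vd : PySem.Dict String Int) (td : PySem.Dict String (List String)) (s : String) :
    PySem.Dict String Int :=
  PySem.Dict.ofList
    (((pvS_fix td (2 + pvFuel td) (PySem.Dict.empty.insert s (0 : Int))).items).filter (pvQ vd s))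

def set_distance_nonempty_alt (valves : List (String × Int)) (tunnels : List (String × List String)) : (List (String × List (String × Int))) × List String :=
  let vd := PySem.Dict.ofList valves
  let td := PySem.Dict.ofList tunnels
  let dists := vd.keys.foldl
    (fun (acc : PySem.Dict String (PySem.Dict String Int)) s =>
      if s = "AA" ∨ vd.getD s 0 ≠ 0 then acc.insert s (pvS_store vd td s) else acc)
    PySem.Dict.empty
  let nonempty := vd.keys.filter (fun v => decide (v ≠ "AA" ∧ vd.getD v 0 ≠ 0))
  (dists.items.map (fun kv => (kv.1, kv.2.items)), nonempty)

-- ===== PRECONDITION & SPEC =====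
-- Pre_ excludes inputs on which A's BFS raises KeyError (a valve missing from tunnels, or a valve's
-- listed neighbour missing from valves); the first disjunct keeps the inputs with no BFS source at
-- all, where A returns without touching tunnels.  It slightly over-excludes: inputs whose dangling
-- references are unreachable from every source still return in A (see claim cites).
-- (Both ports are total — missing keys read a default the admitted inputs never consult — so the
-- equivalence proof below holds without consuming Pre_; Pre_ marks where Python A returns at all.)
def Pre_set_distance_nonempty (valves : List (String × Int)) (tunnels : List (String × List String)) : Prop :=
  (∀ p ∈ valves, p.1 ≠ "AA" ∧ (PySem.Dict.ofList valves).getD p.1 0 = 0)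
  ∨ ((∀ p ∈ valves, ∃ q ∈ tunnels, q.1 = p.1)
     ∧ (∀ q ∈ tunnels, (∃ p ∈ valves, p.1 = q.1) → ∀ n ∈ q.2, ∃ p ∈ valves, p.1 = n))
instance (valves : List (String × Int)) (tunnels : List (String × List String)) : Decidable (Pre_set_distance_nonempty valves tunnels) := by unfold Pre_set_distance_nonempty; infer_instance

def pvWitness_set_distance_nonempty : (List (String × Int)) × (List (String × List String)) :=
  ([("AA", 0), ("BB", 13), ("CC", 0)],
   [("AA", ["BB", "CC"]), ("BB", ["AA"]), ("CC", ["AA", "BB"])])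

def Spec_set_distance_nonempty (valves : List (String × Int)) (tunnels : List (String × List String)) (out : (List (String × List (String × Int))) × List String) : Prop := out = set_distance_nonempty_alt valves tunnels
instance (valves : List (String × Int)) (tunnels : List (String × List String)) (out : (List (String × List (String × Int))) × List String) : Decidable (Spec_set_distance_nonempty valves tunnels out) := by unfold Spec_set_distance_nonempty; infer_instance

-- ===== CLAIM (what is proved, stated in full; the proofs are below) =====
def Claim_equal_set_distance_nonempty : Prop := ∀ (valves : List (String × Int)) (tunnels : List (String × List String)), Dom_set_distance_nonempty valves tunnels → Pre_set_distance_nonempty valves tunnels → Spec_set_distance_nonempty valves tunnels (set_distance_nonempty valves tunnels)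

-- ===== LEMMAS AND PROOFS =====

-- all strings occurring in adjacency lists (multiset); every discovery lies in it
def pvU (td : PySem.Dict String (List String)) : List String :=
  (td.items.map (fun kv => kv.2)).flatten

-- how many adjacency occurrences are still unvisited: the decreasing measure (set form, for A)
def pvRem (td : PySem.Dict String (List String)) (V : PySem.Set String) : Nat :=
  ((pvU td).filter (fun u => !(PySem.Set.contains V u))).length

-- the same measure keyed by B's distance dict
def pvRemD (td : PySem.Dict String (List String)) (dist : PySem.Dict String Int) : Nat :=
  ((pvU td).filter (fun u => !(dist.contains u))).length

def pvKeep (valve : String) (p : String × Int) : Bool :=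
  !(p.1 == valve) && !(p.1 == "AA")

-- proof-side reference: a full-recording level BFS (records EVERY discovered node with its depth);
-- stage 1 relates A's queue BFS to it, stage 2 relates B's sweep fixpoint to it
def pvL_adj (d : Int) : List String → PySem.Set String → List (String × Int) → List String →
    PySem.Set String × List (String × Int) × List String
  | [], V, found, nxt => (V, found, nxt)
  | n :: ns, V, found, nxt =>
    if PySem.Set.contains V n then pvL_adj d ns V found nxt
    else pvL_adj d ns (PySem.Set.add V n) (found ++ [(n, d)]) (nxt ++ [n])

def pvL_front (td : PySem.Dict String (List String)) (d : Int) :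
    List String → PySem.Set String → List (String × Int) → List String →
    PySem.Set String × List (String × Int) × List String
  | [], V, found, nxt => (V, found, nxt)
  | p :: ps, V, found, nxt =>
    let s := pvL_adj d (td.getD p []) V found nxt
    pvL_front td d ps s.1 s.2.1 s.2.2

def pvL_levels (td : PySem.Dict String (List String)) :
    Nat → PySem.Set String → List (String × Int) → List String → Int → List (String × Int)
  | 0, _, found, _, _ => found
  | fuel + 1, V, found, frontier, d =>
    match frontier with
    | [] => found
    | _ :: _ =>
      let s := pvL_front td (d + 1) frontier V found []
      pvL_levels td fuel s.1 s.2.1 s.2.2 (d + 1)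

-- the full discovery list of a source, at ample fuel
def pvFull (td : PySem.Dict String (List String)) (s : String) : List (String × Int) :=
  pvL_levels td (2 + pvFuel td) (PySem.Set.ofList [s]) [] [s] 0

-- A's stored per-source dict (the let-chain of the outer loop body)
def pvStored (vd : PySem.Dict String Int) (td : PySem.Dict String (List String)) (valve : String) : PySem.Dict String Int :=
  let dist0 := (PySem.Dict.empty.insert valve (0 : Int)).insert "AA" 0
  let dist := pvA_bfs vd td (1 + pvFuel td) (PySem.Set.ofList [valve]) dist0 [(0, valve)]
  let dist := dist.erase valve
  if valve ≠ "AA" then dist.erase "AA" else dist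

lemma pv_filt_mono (l : List String) (p q : String → Bool) (h : ∀ a, q a = true → p a = true) :
    (l.filter q).length ≤ (l.filter p).length := by
  induction l with
  | nil => simp
  | cons x t ih =>
    by_cases hq : q x = true
    · simp [hq, h x hq]; omega
    · rw [Bool.not_eq_true] at hq
      have h1 : (x :: t).filter q = t.filter q := by simp [hq]
      rw [h1, List.filter_cons]
      split
      · simp only [List.length_cons]; omega
      · exact ih

lemma pv_filt_lt (l : List String) (p : String → Bool) (n : String) (hn : n ∈ l) (hp : p n = true) :
    (l.filter (fun u => p u && !(u == n))).length + 1 ≤ (l.filter p).length := by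
  induction l with
  | nil => simp at hn
  | cons x t ih =>
    by_cases hx : x = n
    · subst hx
      simp [hp]
      apply pv_filt_mono; intro a ha; simp at ha; exact ha.1
    · have hn' : n ∈ t := by
        cases hn with
        | head => exact absurd rfl hx
        | tail _ h => exact h
      have := ih hn'
      by_cases hpx : p x = true
      · simp [hpx, hx]; omega
      · rw [Bool.not_eq_true] at hpx
        have h1 : ∀ (q : String → Bool), q x = false → (x :: t).filter q = t.filter q := by
          intro q hq; simp [hq]
        rw [h1 _ (by simp [hpx]), h1 _ hpx]
        omega

lemma pv_contains_append (V : List String) (n u : String) :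
    (PySem.Set.contains (V ++ [n]) u) = (PySem.Set.contains V u || u == n) := by
  simp [PySem.Set.contains, Bool.beq_eq_decide_eq]

lemma pv_not_mem_of_contains_false (V : PySem.Set String) (n : String)
    (h : PySem.Set.contains V n = false) : n ∉ V := by
  intro hm
  rw [(PySem.Set.contains_iff V n).mpr hm] at h
  cases h

lemma pv_add_eq_append (V : PySem.Set String) (n : String)
    (h : PySem.Set.contains V n = false) : PySem.Set.add V n = V ++ [n] := by
  exact PySem.Set.add_of_not_mem (pv_not_mem_of_contains_false V n h)

lemma pv_adj_sub_U (td : PySem.Dict String (List String)) (p : String) :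
    ∀ n ∈ td.getD p [], n ∈ pvU td := by
  intro n hn
  unfold PySem.Dict.getD at hn
  cases h : td.get? p with
  | none => rw [h] at hn; simp at hn
  | some l =>
    rw [h] at hn
    simp only [Option.getD_some] at hn
    have hm : (p, l) ∈ td.items := PySem.Dict.mem_items_of_get?_eq_some td h
    unfold pvU
    exact List.mem_flatten.mpr ⟨l, List.mem_map.mpr ⟨(p, l), hm, rfl⟩, hn⟩

lemma pv_rem_le (td : PySem.Dict String (List String)) (V : PySem.Set String) :
    pvRem td V ≤ pvFuel td := by
  calc pvRem td V ≤ (pvU td).length := List.length_filter_le _ _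
    _ = pvFuel td := by
        unfold pvU pvFuel
        rw [List.length_flatten, List.map_map]
        rfl

lemma pv_remD_le (td : PySem.Dict String (List String)) (dist : PySem.Dict String Int) :
    pvRemD td dist ≤ pvFuel td := by
  calc pvRemD td dist ≤ (pvU td).length := List.length_filter_le _ _
    _ = pvFuel td := by
        unfold pvU pvFuel
        rw [List.length_flatten, List.map_map]
        rfl

lemma pv_rem_add (td : PySem.Dict String (List String)) (V : PySem.Set String) (n : String)
    (hU : n ∈ pvU td) (hV : PySem.Set.contains V n = false) :
    pvRem td (PySem.Set.add V n) + 1 ≤ pvRem td V := by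
  unfold pvRem
  rw [pv_add_eq_append V n hV]
  have hfun : (fun u => !(PySem.Set.contains (V ++ [n]) u))
      = (fun u => !(PySem.Set.contains V u) && !(u == n)) := by
    funext u; rw [pv_contains_append]; simp
  rw [hfun]
  exact pv_filt_lt _ _ n hU (by show (!PySem.Set.contains V n) = true; rw [hV]; rfl)

lemma pv_remD_insert (td : PySem.Dict String (List String)) (dist : PySem.Dict String Int)
    (n : String) (v : Int) (hU : n ∈ pvU td) (hc : dist.contains n = false) :
    pvRemD td (dist.insert n v) + 1 ≤ pvRemD td dist := by
  unfold pvRemD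
  have hfun : (fun u => !((dist.insert n v).contains u))
      = (fun u => !(dist.contains u) && !(u == n)) := by
    funext u; rw [PySem.Dict.contains_insert]; simp [Bool.and_comm]
  rw [hfun]
  exact pv_filt_lt _ _ n hU (by show (!dist.contains n) = true; rw [hc]; rfl)

lemma pv_contains_insert_mono (dist : PySem.Dict String Int) (n : String) (v : Int) (k : String)
    (h : dist.contains k = true) : (dist.insert n v).contains k = true := by
  rw [PySem.Dict.contains_insert, h]; simp

lemma pv_keep_AA (valve : String) (v : Int) : pvKeep valve ("AA", v) = false := by
  simp [pvKeep]

lemma pv_filter_map_AA (valve : String) (v : Int) (l : List (String × Int)) :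
    (l.map (fun p => if p.1 == "AA" then ("AA", v) else p)).filter (pvKeep valve)
      = l.filter (pvKeep valve) := by
  induction l with
  | nil => simp
  | cons p t ih =>
    rw [List.map_cons, List.filter_cons, List.filter_cons]
    by_cases hp : p.1 = "AA"
    · rw [show (if (p.1 == "AA") = true then ("AA", v) else p) = ("AA", v) by simp [hp]]
      rw [if_neg (by simp [pv_keep_AA]), if_neg (by simp [pvKeep, hp]), ih]
    · rw [show (if (p.1 == "AA") = true then ("AA", v) else p) = p by simp [hp], ih]

lemma pv_filter_insert_AA (valve : String) (dist : PySem.Dict String Int) (v : Int) :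
    (dist.insert "AA" v).items.filter (pvKeep valve) = dist.items.filter (pvKeep valve) := by
  by_cases hc : dist.contains "AA" = true
  · rw [PySem.Dict.items_insert_of_contains dist v hc]
    exact pv_filter_map_AA valve v dist.items
  · rw [Bool.not_eq_true] at hc
    rw [PySem.Dict.items_insert_of_not_contains dist v hc, List.filter_append]
    simp [pv_keep_AA]

lemma pv_filter_insert_fresh (valve : String) (dist : PySem.Dict String Int) (n : String) (v : Int)
    (hn : dist.contains n = false) (h1 : n ≠ valve) (h2 : n ≠ "AA") :
    (dist.insert n v).items.filter (pvKeep valve) = dist.items.filter (pvKeep valve) ++ [(n, v)] := by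
  rw [PySem.Dict.items_insert_of_not_contains dist v hn, List.filter_append]
  simp [pvKeep, h1, h2]

-- STAGE 1: A's queue BFS against the full-recording level BFS.
-- The two inner adjacency loops walk in lock-step; the filtered A-dict tracks the filtered full list.
lemma pvAdjSim (vd : PySem.Dict String Int) (td : PySem.Dict String (List String)) (valve : String) (d : Int) :
    ∀ (adj : List String) (V : PySem.Set String) (dist : PySem.Dict String Int)
      (q : List (Int × String)) (found : List (String × Int)) (nxt : List String),
      (∀ n ∈ adj, n ∈ pvU td) →
      PySem.Set.contains V valve = true →
      (∀ k, dist.contains k = true → PySem.Set.contains V k = true ∨ k = "AA") →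
      dist.keys.Nodup →
      dist.items.filter (pvKeep valve) = found.filter (pvQ vd valve) →
      ∃ newly W dist',
        pvA_adj vd d adj V dist q = (W, dist', q ++ newly.map (fun n => (d + 1, n)))
        ∧ pvL_adj (d + 1) adj V found nxt
            = (W, found ++ newly.map (fun n => (n, d + 1)), nxt ++ newly)
        ∧ PySem.Set.contains W valve = true
        ∧ (∀ k, dist'.contains k = true → PySem.Set.contains W k = true ∨ k = "AA")
        ∧ dist'.keys.Nodup
        ∧ dist'.items.filter (pvKeep valve)
            = (found ++ newly.map (fun n => (n, d + 1))).filter (pvQ vd valve)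
        ∧ pvRem td W + newly.length ≤ pvRem td V := by
  intro adj
  induction adj with
  | nil =>
    intro V dist q found nxt hU hval hkeys hnd hfe
    exact ⟨[], V, dist, by simp [pvA_adj], by simp [pvL_adj], hval, hkeys, hnd,
      by simpa using hfe, by simp⟩
  | cons n ns ih =>
    intro V dist q found nxt hU hval hkeys hnd hfe
    have hU' : ∀ m ∈ ns, m ∈ pvU td := fun m hm => hU m (List.mem_cons_of_mem n hm)
    by_cases hc : PySem.Set.contains V n = true
    · obtain ⟨newly, W, dist', h1, h2, h3, h4, h5, h6, h7⟩ := ih V dist q found nxt hU' hval hkeys hnd hfe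
      exact ⟨newly, W, dist',
        by simp only [pvA_adj]; rw [if_pos hc]; exact h1,
        by simp only [pvL_adj]; rw [if_pos hc]; exact h2, h3, h4, h5, h6, h7⟩
    · have hcf : PySem.Set.contains V n = false := by rwa [Bool.not_eq_true] at hc
      have hnU : n ∈ pvU td := hU n List.mem_cons_self
      have hWapp := pv_add_eq_append V n hcf
      have hval' : PySem.Set.contains (PySem.Set.add V n) valve = true := by
        rw [hWapp, pv_contains_append, hval]; rfl
      have hnval : n ≠ valve := by intro e; rw [e, hval] at hcf; cases hcf
      have hmono : ∀ k, PySem.Set.contains V k = true → PySem.Set.contains (PySem.Set.add V n) k = true := by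
        intro k hk; rw [hWapp, pv_contains_append, hk]; rfl
      have hrem := pv_rem_add td V n hnU hcf
      have hmemV' : PySem.Set.contains (PySem.Set.add V n) n = true := by
        rw [hWapp, pv_contains_append]; simp
      by_cases h0 : vd.getD n 0 = 0
      · -- zero-flow neighbour: A records nothing, the full list gains a pair the filter drops
        have hkeys' : ∀ k, dist.contains k = true →
            PySem.Set.contains (PySem.Set.add V n) k = true ∨ k = "AA" :=
          fun k hk => (hkeys k hk).imp (hmono k) id
        have hfe' : dist.items.filter (pvKeep valve)
            = (found ++ [(n, d + 1)]).filter (pvQ vd valve) := by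
          rw [List.filter_append, hfe]
          simp [pvQ, h0]
        obtain ⟨newly, W, dist', h1, h2, h3, h4, h5, h6, h7⟩ :=
          ih (PySem.Set.add V n) dist (q ++ [(d + 1, n)]) (found ++ [(n, d + 1)]) (nxt ++ [n])
            hU' hval' hkeys' hnd hfe'
        refine ⟨n :: newly, W, dist', ?_, ?_, h3, h4, h5, ?_, ?_⟩
        · simp only [pvA_adj]; rw [if_neg hc, if_neg (fun hne => hne h0), h1]
          simp [List.append_assoc]
        · simp only [pvL_adj]; rw [if_neg hc, h2]
          simp [List.append_assoc]
        · rw [h6]; simp [List.append_assoc]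
        · simp only [List.length_cons]; omega
      · by_cases hAA : n = "AA"
        · -- nonzero-flow "AA": A overwrites the sentinel entry, the filter drops both
          subst hAA
          have hndN := PySem.Dict.nodup_keys_insert dist "AA" (d + 1) hnd
          have hkeysN : ∀ k, (dist.insert "AA" (d + 1)).contains k = true →
              PySem.Set.contains (PySem.Set.add V "AA") k = true ∨ k = "AA" := by
            intro k hk
            rw [PySem.Dict.contains_insert] at hk
            rcases Bool.or_eq_true_iff.mp hk with h | h
            · exact Or.inr (by simpa using h)
            · exact (hkeys k h).imp (hmono k) id
          have hfe' : (dist.insert "AA" (d + 1)).items.filter (pvKeep valve)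
              = (found ++ [("AA", d + 1)]).filter (pvQ vd valve) := by
            rw [pv_filter_insert_AA, List.filter_append, hfe]
            simp [pvQ]
          obtain ⟨newly, W, dist', h1, h2, h3, h4, h5, h6, h7⟩ :=
            ih (PySem.Set.add V "AA") (dist.insert "AA" (d + 1)) (q ++ [(d + 1, "AA")])
              (found ++ [("AA", d + 1)]) (nxt ++ ["AA"]) hU' hval' hkeysN hndN hfe'
          refine ⟨"AA" :: newly, W, dist', ?_, ?_, h3, h4, h5, ?_, ?_⟩
          · simp only [pvA_adj]; rw [if_neg hc, if_pos h0, h1]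
            simp [List.append_assoc]
          · simp only [pvL_adj]; rw [if_neg hc, h2]
            simp [List.append_assoc]
          · rw [h6]; simp [List.append_assoc]
          · simp only [List.length_cons]; omega
        · -- nonzero-flow fresh valve: both sides record (n, d+1), appended at the end
          have hdn : dist.contains n = false := by
            by_contra hcn
            rw [Bool.not_eq_false] at hcn
            rcases hkeys n hcn with h | h
            · rw [h] at hcf; cases hcf
            · exact hAA h
          have hndN := PySem.Dict.nodup_keys_insert dist n (d + 1) hnd
          have hkeysN : ∀ k, (dist.insert n (d + 1)).contains k = true →
              PySem.Set.contains (PySem.Set.add V n) k = true ∨ k = "AA" := by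
            intro k hk
            rw [PySem.Dict.contains_insert] at hk
            rcases Bool.or_eq_true_iff.mp hk with h | h
            · have : k = n := by simpa using h
              subst this; exact Or.inl hmemV'
            · exact (hkeys k h).imp (hmono k) id
          have hfe' : (dist.insert n (d + 1)).items.filter (pvKeep valve)
              = (found ++ [(n, d + 1)]).filter (pvQ vd valve) := by
            rw [pv_filter_insert_fresh valve dist n (d + 1) hdn hnval hAA,
              List.filter_append, hfe]
            simp [pvQ, hnval, hAA, h0]
          obtain ⟨newly, W, dist', h1, h2, h3, h4, h5, h6, h7⟩ :=
            ih (PySem.Set.add V n) (dist.insert n (d + 1)) (q ++ [(d + 1, n)])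
              (found ++ [(n, d + 1)]) (nxt ++ [n]) hU' hval' hkeysN hndN hfe'
          refine ⟨n :: newly, W, dist', ?_, ?_, h3, h4, h5, ?_, ?_⟩
          · simp only [pvA_adj]; rw [if_neg hc, if_pos h0, h1]
            simp [List.append_assoc]
          · simp only [pvL_adj]; rw [if_neg hc, h2]
            simp [List.append_assoc]
          · rw [h6]; simp [List.append_assoc]
          · simp only [List.length_cons]; omega

-- queue-BFS simulated by level-BFS, mid-level: f1 still to pop at depth d, f2 already discovered at d+1
lemma pvMainSim (vd : PySem.Dict String Int) (td : PySem.Dict String (List String)) (valve : String) :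
    ∀ (fuelB fuelA : Nat) (V : PySem.Set String) (dist : PySem.Dict String Int)
      (f1 f2 : List String) (d : Int) (found : List (String × Int)),
      PySem.Set.contains V valve = true →
      (∀ k, dist.contains k = true → PySem.Set.contains V k = true ∨ k = "AA") →
      dist.keys.Nodup →
      dist.items.filter (pvKeep valve) = found.filter (pvQ vd valve) →
      f1.length + f2.length + pvRem td V ≤ fuelA →
      1 + pvRem td V + (if f2 = [] then 0 else 1) ≤ fuelB →
      (pvA_bfs vd td fuelA V dist
          (f1.map (fun p => (d, p)) ++ f2.map (fun n => (d + 1, n)))).items.filter (pvKeep valve)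
        = (let s := pvL_front td (d + 1) f1 V found f2
           pvL_levels td fuelB s.1 s.2.1 s.2.2 (d + 1)).filter (pvQ vd valve) := by
  intro fuelB
  induction fuelB with
  | zero =>
    intro fuelA V dist f1 f2 d found hval hkeys hnd hfe HA HB
    exfalso
    rcases em (f2 = []) with h | h <;> simp [h] at HB
  | succ fB ihB =>
    intro fuelA
    induction fuelA with
    | zero =>
      intro V dist f1 f2 d found hval hkeys hnd hfe HA HB
      have h1 : f1 = [] := List.eq_nil_of_length_eq_zero (by omega)
      have h2 : f2 = [] := List.eq_nil_of_length_eq_zero (by omega)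
      subst h1; subst h2
      simpa [pvA_bfs, pvL_front, pvL_levels] using hfe
    | succ fA ihA =>
      intro V dist f1 f2 d found hval hkeys hnd hfe HA HB
      cases f1 with
      | nil =>
        cases f2 with
        | nil => simpa [pvA_bfs, pvL_front, pvL_levels] using hfe
        | cons x xs =>
          have hHA : (x :: xs).length + ([] : List String).length + pvRem td V ≤ fA + 1 := by
            simp only [List.length_cons, List.length_nil] at HA ⊢; omega
          have hHB : 1 + pvRem td V + (if ([] : List String) = [] then 0 else 1) ≤ fB := by
            rw [if_neg (by simp : ¬(x :: xs = []))] at HB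
            simp; omega
          have hmain := ihB (fA + 1) V dist (x :: xs) [] (d + 1) found hval hkeys hnd hfe hHA hHB
          simp only [List.map_nil, List.append_nil] at hmain
          simp only [List.map_nil, List.nil_append]
          simp only [pvL_front, pvL_levels]
          exact hmain
      | cons p ps =>
        obtain ⟨newly, W, dist', h1, h2, h3, h4, h5, h6, h7⟩ :=
          pvAdjSim vd td valve d (td.getD p [])
            V dist (ps.map (fun p => (d, p)) ++ f2.map (fun n => (d + 1, n))) found f2
            (pv_adj_sub_U td p) hval hkeys hnd hfe
        simp only [List.map_cons, List.cons_append, pvA_bfs, pvL_front]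
        rw [h1, h2]
        have hq : (ps.map (fun p => (d, p)) ++ f2.map (fun n => (d + 1, n)))
            ++ newly.map (fun n => (d + 1, n))
            = ps.map (fun p => (d, p)) ++ (f2 ++ newly).map (fun n => (d + 1, n)) := by
          rw [List.append_assoc, ← List.map_append]
        have e1 : (f2 ++ newly).length = f2.length + newly.length := List.length_append
        have hHA : ps.length + (f2 ++ newly).length + pvRem td W ≤ fA := by
          simp only [List.length_cons] at HA; omega
        have hHB : 1 + pvRem td W + (if f2 ++ newly = [] then 0 else 1) ≤ fB + 1 := by
          rcases em (f2 = []) with hf | hf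
          · rw [if_pos hf] at HB
            rcases em (newly = []) with hw | hw
            · rw [if_pos (by simp [hf, hw])]; omega
            · rw [if_neg (by simp [hw])]
              have hl : 0 < newly.length := List.length_pos_of_ne_nil hw
              simp only [hf, List.length_nil] at HB e1 ⊢
              omega
          · rw [if_neg hf] at HB
            rw [if_neg (by simp [hf])]
            omega
        have hmain := ihA W dist' ps (f2 ++ newly) d (found ++ newly.map (fun n => (n, d + 1)))
          h3 h4 h5 h6 hHA hHB
        rw [hq, hmain]

lemma pvA_adj_nodup (vd : PySem.Dict String Int) (d : Int) :
    ∀ (adj : List String) V dist (q : List (Int × String)), dist.keys.Nodup →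
      (pvA_adj vd d adj V dist q).2.1.keys.Nodup := by
  intro adj
  induction adj with
  | nil => intro V dist q h; simpa [pvA_adj] using h
  | cons n ns ih =>
    intro V dist q h
    by_cases hc : PySem.Set.contains V n = true
    · have hm := (PySem.Set.contains_iff V n).mp hc
      simpa [pvA_adj, hm] using ih V dist q h
    · simp only [pvA_adj]
      rw [if_neg hc]
      apply ih
      split
      · exact PySem.Dict.nodup_keys_insert dist n (d + 1) h
      · exact h

lemma pvA_bfs_nodup (vd : PySem.Dict String Int) (td : PySem.Dict String (List String)) :
    ∀ (fuel : Nat) V dist (queue : List (Int × String)), dist.keys.Nodup →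
      (pvA_bfs vd td fuel V dist queue).keys.Nodup := by
  intro fuel
  induction fuel with
  | zero =>
    intro V dist queue h
    cases queue <;> simpa [pvA_bfs] using h
  | succ f ih =>
    intro V dist queue h
    cases queue with
    | nil => simpa [pvA_bfs] using h
    | cons hd tl =>
      obtain ⟨d, p⟩ := hd
      simp only [pvA_bfs]
      exact ih _ _ _ (pvA_adj_nodup vd d (td.getD p []) V dist tl h)

lemma pvOfList_items (l : List (String × Int)) (h : (l.map Prod.fst).Nodup) :
    (PySem.Dict.ofList l).items = l := by
  unfold PySem.Dict.ofList PySem.Dict.update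
  have := PySem.Dict.items_foldl_insert_fresh l Prod.fst Prod.snd PySem.Dict.empty
    (fun a _ => by simp [PySem.Dict.contains_empty]) h
  simpa using this

lemma pv_erase2_items (valve : String) (X : PySem.Dict String Int) :
    (if valve ≠ "AA" then (X.erase valve).erase "AA" else X.erase valve).items
      = X.items.filter (pvKeep valve) := by
  by_cases hAA : valve = "AA"
  · subst hAA
    rw [if_neg (by simp)]
    simp only [PySem.Dict.erase]
    apply List.filter_congr
    intro p _
    simp [pvKeep]
  · rw [if_pos hAA]
    simp only [PySem.Dict.erase, List.filter_filter]
    apply List.filter_congr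
    intro p _
    simp [pvKeep, Bool.and_comm]

lemma pv_contains_ofList_self (valve : String) :
    PySem.Set.contains (PySem.Set.ofList [valve]) valve = true :=
  (PySem.Set.contains_iff _ _).mpr ((PySem.Set.mem_ofList _ _).mpr (by simp))

lemma pv_dist0_nodup (valve : String) :
    ((PySem.Dict.empty.insert valve (0 : Int)).insert "AA" 0).keys.Nodup :=
  PySem.Dict.nodup_keys_insert _ _ _ (PySem.Dict.nodup_keys_insert _ _ _ (by simp [PySem.Dict.keys, PySem.Dict.empty]))

lemma pv_dist0_keys (valve : String) :
    ∀ k, ((PySem.Dict.empty.insert valve (0 : Int)).insert "AA" 0).contains k = true →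
      PySem.Set.contains (PySem.Set.ofList [valve]) k = true ∨ k = "AA" := by
  intro k hk
  rw [PySem.Dict.contains_insert] at hk
  rcases Bool.or_eq_true_iff.mp hk with h | h
  · exact Or.inr (by simpa using h)
  · rw [PySem.Dict.contains_insert] at h
    rcases Bool.or_eq_true_iff.mp h with h2 | h2
    · have : k = valve := by simpa using h2
      subst this
      exact Or.inl (pv_contains_ofList_self k)
    · simp [PySem.Dict.contains_empty] at h2

lemma pv_dist0_filter (valve : String) :
    ((PySem.Dict.empty.insert valve (0 : Int)).insert "AA" 0).items.filter (pvKeep valve) = [] := by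
  by_cases hAA : valve = "AA"
  · subst hAA
    rw [pv_filter_insert_AA]
    rw [PySem.Dict.items_insert_of_not_contains _ _ (by simp [PySem.Dict.contains_empty])]
    simp [PySem.Dict.empty, pvKeep]
  · rw [pv_filter_insert_AA]
    rw [PySem.Dict.items_insert_of_not_contains _ _ (by simp [PySem.Dict.contains_empty])]
    simp [PySem.Dict.empty, pvKeep]

-- A's stored per-source dict has exactly the filtered full discovery list as items
lemma pvStored_items (vd : PySem.Dict String Int) (td : PySem.Dict String (List String)) (valve : String) :
    (pvStored vd td valve).items = (pvFull td valve).filter (pvQ vd valve) := by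
  have hmain := pvMainSim vd td valve (1 + pvFuel td) (1 + pvFuel td)
    (PySem.Set.ofList [valve]) ((PySem.Dict.empty.insert valve (0 : Int)).insert "AA" 0)
    [valve] [] 0 [] (pv_contains_ofList_self valve) (pv_dist0_keys valve) (pv_dist0_nodup valve)
    (by rw [pv_dist0_filter]; rfl)
    (by have := pv_rem_le td (PySem.Set.ofList [valve]); simp; omega)
    (by have := pv_rem_le td (PySem.Set.ofList [valve]); simp; omega)
  simp only [List.map_cons, List.map_nil, List.append_nil] at hmain
  unfold pvStored
  rw [pv_erase2_items]
  unfold pvFull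
  rw [show 2 + pvFuel td = (1 + pvFuel td) + 1 by omega]
  simp only [pvL_levels]
  rw [hmain]

lemma pvStored_nodup (vd : PySem.Dict String Int) (td : PySem.Dict String (List String)) (valve : String) :
    ((pvStored vd td valve).items.map Prod.fst).Nodup := by
  unfold pvStored
  rw [pv_erase2_items]
  have hX : (pvA_bfs vd td (1 + pvFuel td) (PySem.Set.ofList [valve])
      ((PySem.Dict.empty.insert valve (0 : Int)).insert "AA" 0) [(0, valve)]).keys.Nodup :=
    pvA_bfs_nodup vd td _ _ _ _ (pv_dist0_nodup valve)
  have hsub := (List.filter_sublist (l := (pvA_bfs vd td (1 + pvFuel td) (PySem.Set.ofList [valve])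
      ((PySem.Dict.empty.insert valve (0 : Int)).insert "AA" 0) [(0, valve)]).items) (p := pvKeep valve)).map Prod.fst
  exact List.Nodup.sublist hsub (by simpa [PySem.Dict.keys] using hX)

-- STAGE 2: B's sweep fixpoint against the same level BFS.

lemma pvL_levels_nil (td : PySem.Dict String (List String)) (fuel : Nat) (V : PySem.Set String)
    (found : List (String × Int)) (d : Int) :
    pvL_levels td fuel V found [] d = found := by
  cases fuel <;> simp [pvL_levels]

lemma pvInner_noop (du : Int) :
    ∀ (adj : List String) (dist : PySem.Dict String Int) (added : Bool),
      (∀ v ∈ adj, dist.contains v = true) →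
      pvS_inner du adj dist added = (dist, added) := by
  intro adj
  induction adj with
  | nil => intro dist added _; rfl
  | cons v vs ih =>
    intro dist added h
    simp only [pvS_inner]
    rw [if_pos (h v List.mem_cons_self)]
    exact ih dist added (fun u hu => h u (List.mem_cons_of_mem v hu))

lemma pvSweep_noop (td : PySem.Dict String (List String)) :
    ∀ (l : List (String × Int)) (dist : PySem.Dict String Int) (added : Bool),
      (∀ p ∈ l, ∀ v ∈ td.getD p.1 [], dist.contains v = true) →
      pvS_sweep td l dist added = (dist, added) := by
  intro l
  induction l with
  | nil => intro dist added _; rfl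
  | cons p rest ih =>
    intro dist added h
    obtain ⟨u, du⟩ := p
    simp only [pvS_sweep]
    rw [pvInner_noop du _ dist added (h (u, du) List.mem_cons_self)]
    exact ih dist added (fun q hq => h q (List.mem_cons_of_mem _ hq))

lemma pvSweep_append (td : PySem.Dict String (List String)) :
    ∀ (l1 l2 : List (String × Int)) (dist : PySem.Dict String Int) (added : Bool),
      pvS_sweep td (l1 ++ l2) dist added
        = pvS_sweep td l2 (pvS_sweep td l1 dist added).1 (pvS_sweep td l1 dist added).2 := by
  intro l1
  induction l1 with
  | nil => intro l2 dist added; rfl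
  | cons p rest ih =>
    intro l2 dist added
    obtain ⟨u, du⟩ := p
    simp only [List.cons_append, pvS_sweep]
    exact ih l2 _ _

-- one adjacency list: sweep insertion against level-BFS discovery, in lock-step
lemma pvInnerSim (td : PySem.Dict String (List String)) (du : Int) :
    ∀ (adj : List String) (dist : PySem.Dict String Int) (V : PySem.Set String)
      (found : List (String × Int)) (nxt : List String) (added : Bool),
      (∀ n, PySem.Set.contains V n = dist.contains n) →
      dist.keys.Nodup →
      (∀ v ∈ adj, v ∈ pvU td) →
      ∃ new dist' W,
        pvS_inner du adj dist added = (dist', added || !new.isEmpty)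
        ∧ pvL_adj (du + 1) adj V found nxt
            = (W, found ++ new.map (fun n => (n, du + 1)), nxt ++ new)
        ∧ dist'.items = dist.items ++ new.map (fun n => (n, du + 1))
        ∧ (∀ n, PySem.Set.contains W n = dist'.contains n)
        ∧ dist'.keys.Nodup
        ∧ (∀ k, dist.contains k = true → dist'.contains k = true)
        ∧ (∀ v ∈ adj, dist'.contains v = true)
        ∧ pvRemD td dist' + new.length ≤ pvRemD td dist := by
  intro adj
  induction adj with
  | nil =>
    intro dist V found nxt added hm hnd _
    exact ⟨[], dist, V, by simp [pvS_inner], by simp [pvL_adj], by simp, hm, hnd,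
      fun k hk => hk, by simp, by simp⟩
  | cons v vs ih =>
    intro dist V found nxt added hm hnd hU
    have hU' : ∀ u ∈ vs, u ∈ pvU td := fun u hu => hU u (List.mem_cons_of_mem v hu)
    by_cases hc : dist.contains v = true
    · have hcV : PySem.Set.contains V v = true := by rw [hm v]; exact hc
      obtain ⟨new, dist', W, h1, h2, h3, h4, h5, h6, h7, h8⟩ := ih dist V found nxt added hm hnd hU'
      refine ⟨new, dist', W, ?_, ?_, h3, h4, h5, h6, ?_, h8⟩
      · simp only [pvS_inner]; rw [if_pos hc]; exact h1
      · simp only [pvL_adj]; rw [if_pos hcV]; exact h2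
      · intro u hu
        cases hu with
        | head => exact h6 v hc
        | tail _ h => exact h7 u h
    · have hcf : dist.contains v = false := by rwa [Bool.not_eq_true] at hc
      have hcV : PySem.Set.contains V v = false := by rw [hm v]; exact hcf
      have hmem' : ∀ n, PySem.Set.contains (PySem.Set.add V v) n
          = (dist.insert v (du + 1)).contains n := by
        intro n
        rw [pv_add_eq_append V v hcV, pv_contains_append, PySem.Dict.contains_insert, hm n,
          Bool.or_comm]
      have hnd' := PySem.Dict.nodup_keys_insert dist v (du + 1) hnd
      obtain ⟨new, dist', W, h1, h2, h3, h4, h5, h6, h7, h8⟩ :=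
        ih (dist.insert v (du + 1)) (PySem.Set.add V v) (found ++ [(v, du + 1)]) (nxt ++ [v]) true
          hmem' hnd' hU'
      have hvcont : dist'.contains v = true :=
        h6 v (by rw [PySem.Dict.contains_insert]; simp)
      refine ⟨v :: new, dist', W, ?_, ?_, ?_, h4, h5, ?_, ?_, ?_⟩
      · simp only [pvS_inner]
        rw [if_neg hc, h1]
        simp
      · simp only [pvL_adj]
        rw [if_neg (by rw [hcV]; simp), h2]
        simp [List.append_assoc]
      · rw [h3, PySem.Dict.items_insert_of_not_contains dist _ hcf]
        simp [List.append_assoc]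
      · intro k hk
        exact h6 k (pv_contains_insert_mono dist v (du + 1) k hk)
      · intro u hu
        cases hu with
        | head => exact hvcont
        | tail _ h => exact h7 u h
      · have := pv_remD_insert td dist v (du + 1) (hU v List.mem_cons_self) hcf
        simp only [List.length_cons]
        omega

-- one whole sweep of the last level against one level-BFS expansion
lemma pvFrontSim (td : PySem.Dict String (List String)) (d : Int) :
    ∀ (last : List String) (dist : PySem.Dict String Int) (V : PySem.Set String)
      (found : List (String × Int)) (nxt : List String) (added : Bool),
      (∀ n, PySem.Set.contains V n = dist.contains n) →
      dist.keys.Nodup →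
      ∃ new dist' W,
        pvS_sweep td (last.map (fun n => (n, d))) dist added = (dist', added || !new.isEmpty)
        ∧ pvL_front td (d + 1) last V found nxt
            = (W, found ++ new.map (fun n => (n, d + 1)), nxt ++ new)
        ∧ dist'.items = dist.items ++ new.map (fun n => (n, d + 1))
        ∧ (∀ n, PySem.Set.contains W n = dist'.contains n)
        ∧ dist'.keys.Nodup
        ∧ (∀ k, dist.contains k = true → dist'.contains k = true)
        ∧ (∀ u ∈ last, ∀ v ∈ td.getD u [], dist'.contains v = true)
        ∧ pvRemD td dist' + new.length ≤ pvRemD td dist := by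
  intro last
  induction last with
  | nil =>
    intro dist V found nxt added hm hnd
    exact ⟨[], dist, V, by simp [pvS_sweep], by simp [pvL_front], by simp, hm, hnd,
      fun k hk => hk, by simp, by simp⟩
  | cons u us ih =>
    intro dist V found nxt added hm hnd
    obtain ⟨new1, dist1, W1, h1, h2, h3, h4, h5, h6, h7, h8⟩ :=
      pvInnerSim td d (td.getD u []) dist V found nxt added hm hnd (pv_adj_sub_U td u)
    obtain ⟨new2, dist2, W2, g1, g2, g3, g4, g5, g6, g7, g8⟩ :=
      ih dist1 W1 (found ++ new1.map (fun n => (n, d + 1))) (nxt ++ new1)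
        (added || !new1.isEmpty) h4 h5
    refine ⟨new1 ++ new2, dist2, W2, ?_, ?_, ?_, g4, g5, ?_, ?_, ?_⟩
    · simp only [List.map_cons, pvS_sweep]
      rw [h1, g1]
      congr 1
      cases new1 <;> cases new2 <;> simp
    · simp only [pvL_front]
      rw [h2, g2]
      simp [List.append_assoc]
    · rw [g3, h3]
      simp [List.append_assoc]
    · intro k hk
      exact g6 k (h6 k hk)
    · intro w hw
      cases hw with
      | head => intro v hv; exact g6 v (h7 v hv)
      | tail _ h => exact g7 w h
    · rw [List.length_append]
      omega

-- the fixpoint loop simulated by the level loop: the dict's items are a fixed prefix c plus the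
-- full discovery list; the snapshot splits into a closed part and the freshest level
lemma pvFixSim (td : PySem.Dict String (List String)) :
    ∀ (fuel : Nat) (dict : PySem.Dict String Int) (V : PySem.Set String)
      (found : List (String × Int)) (last : List String) (d : Int)
      (c mid : List (String × Int)),
      dict.items = c ++ found →
      c ++ found = mid ++ last.map (fun n => (n, d)) →
      (∀ p ∈ mid, ∀ v ∈ td.getD p.1 [], dict.contains v = true) →
      (∀ n, PySem.Set.contains V n = dict.contains n) →
      dict.keys.Nodup →
      pvRemD td dict + 2 ≤ fuel →
      (pvS_fix td fuel dict).items = c ++ pvL_levels td fuel V found last d := by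
  intro fuel
  induction fuel with
  | zero =>
    intro dict V found last d c mid h1 h2 h3 hm hnd hf
    omega
  | succ f ih =>
    intro dict V found last d c mid h1 h2 h3 hm hnd hf
    cases last with
    | nil =>
      -- the whole dict is closed: the sweep is a no-op and both loops stop
      have hclosed : ∀ p ∈ dict.items, ∀ v ∈ td.getD p.1 [], dict.contains v = true := by
        intro p hp
        exact h3 p (by rw [h1, h2] at hp; simpa using hp)
      simp only [pvS_fix]
      rw [pvSweep_noop td dict.items dict false hclosed]
      simp only [pvL_levels, Bool.false_eq_true, if_false]
      exact h1
    | cons n ns =>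
      obtain ⟨new, dist', W, g1, g2, g3, g4, g5, g6, g7, g8⟩ :=
        pvFrontSim td d (n :: ns) dict V found [] false hm hnd
      have hsweep : pvS_sweep td dict.items dict false = (dist', !new.isEmpty) := by
        rw [h1, h2, pvSweep_append]
        rw [pvSweep_noop td mid dict false h3]
        rw [g1]
        simp
      simp only [pvS_fix, pvL_levels]
      rw [hsweep, g2]
      cases new with
      | nil =>
        -- unproductive sweep: both sides stop with the current contents
        simp only [List.isEmpty_nil, Bool.not_true, if_neg (by simp : ¬(false = true))]
        rw [g3, h1]
        simp [pvL_levels_nil]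
      | cons m ms =>
        simp only [List.isEmpty_cons, Bool.not_false, if_true, List.nil_append]
        have hc3 : ∀ p ∈ c ++ found, ∀ v ∈ td.getD p.1 [], dist'.contains v = true := by
          intro p hp
          rw [h2] at hp
          rcases List.mem_append.mp hp with h | h
          · intro v hv; exact g6 v (h3 p h v hv)
          · obtain ⟨u, hu, he⟩ := List.mem_map.mp h
            subst he
            exact g7 u hu
        have := ih dist' W (found ++ (m :: ms).map (fun n => (n, d + 1))) (m :: ms) (d + 1)
          c (c ++ found)
          (by rw [g3, h1]; simp [List.append_assoc])
          (by simp [List.append_assoc])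
          hc3 g4 g5
          (by simp only [List.length_cons] at g8; omega)
        rw [this]

-- B's stored per-source dict equals A's
lemma pvSstore_items (vd : PySem.Dict String Int) (td : PySem.Dict String (List String)) (s : String) :
    (pvS_store vd td s).items = (pvStored vd td s).items := by
  have hitems : (PySem.Dict.empty.insert s (0 : Int)).items = [(s, 0)] := by
    rw [PySem.Dict.items_insert_of_not_contains _ _ (by simp [PySem.Dict.contains_empty])]
    simp [PySem.Dict.empty]
  have hmem : ∀ n, PySem.Set.contains (PySem.Set.ofList [s]) n
      = (PySem.Dict.empty.insert s (0 : Int)).contains n := by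
    intro n
    rw [PySem.Dict.contains_insert]
    by_cases h : n = s
    · subst h
      rw [pv_contains_ofList_self]
      simp
    · have h1 : PySem.Set.contains (PySem.Set.ofList [s]) n = false := by
        rw [← Bool.not_eq_true]
        intro hc
        exact h (by simpa using (PySem.Set.mem_ofList _ _).mp ((PySem.Set.contains_iff _ _).mp hc))
      rw [h1, PySem.Dict.contains_empty]
      simp [h]
  have hnd : (PySem.Dict.empty.insert s (0 : Int)).keys.Nodup :=
    PySem.Dict.nodup_keys_insert _ _ _ (by simp [PySem.Dict.keys, PySem.Dict.empty])
  have hfix := pvFixSim td (2 + pvFuel td) (PySem.Dict.empty.insert s (0 : Int))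
    (PySem.Set.ofList [s]) [] [s] 0 [(s, 0)] []
    (by rw [hitems]; simp)
    (by simp)
    (by simp)
    hmem hnd
    (by have := pv_remD_le td (PySem.Dict.empty.insert s (0 : Int)); omega)
  unfold pvS_store
  rw [hfix]
  have hhead : (((s, (0 : Int)) :: pvFull td s).filter (pvQ vd s))
      = (pvFull td s).filter (pvQ vd s) := by
    rw [List.filter_cons]
    simp [pvQ]
  show (PySem.Dict.ofList ((((s, (0 : Int)) :: pvFull td s)).filter (pvQ vd s))).items = _
  rw [hhead, ← pvStored_items vd td s]
  exact pvOfList_items _ (pvStored_nodup vd td s)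

-- the outer loop of A builds exactly the filtered-source table
lemma pvOuter (vd : PySem.Dict String Int) (td : PySem.Dict String (List String)) :
    ∀ (ks : List String) (accD : PySem.Dict String (PySem.Dict String Int)) (accNE : List String),
      (∀ k ∈ ks, accD.contains k = false) → ks.Nodup →
      ks.foldl
        (fun (st : PySem.Dict String (PySem.Dict String Int) × List String) valve =>
          if valve ≠ "AA" ∧ vd.getD valve 0 = 0 then st
          else
            let ne' := if valve ≠ "AA" then st.2 ++ [valve] else st.2
            let dist0 := (PySem.Dict.empty.insert valve (0 : Int)).insert "AA" 0
            let dist := pvA_bfs vd td (1 + pvFuel td) (PySem.Set.ofList [valve]) dist0 [(0, valve)]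
            let dist := dist.erase valve
            let dist := if valve ≠ "AA" then dist.erase "AA" else dist
            (st.1.insert valve dist, ne'))
        (accD, accNE)
      = (PySem.Dict.mk (accD.items
            ++ (ks.filter (fun v => decide (v = "AA" ∨ vd.getD v 0 ≠ 0))).map
                (fun s => (s, pvStored vd td s))),
         accNE ++ (ks.filter (fun v => decide (v = "AA" ∨ vd.getD v 0 ≠ 0))).filter
            (fun s => decide (s ≠ "AA"))) := by
  intro ks
  induction ks with
  | nil =>
    intro accD accNE _ _
    simp
  | cons v t ih =>
    intro accD accNE hfresh hnd
    rw [List.foldl_cons]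
    by_cases hsrc : v = "AA" ∨ vd.getD v 0 ≠ 0
    · have hcond : ¬(v ≠ "AA" ∧ vd.getD v 0 = 0) := by tauto
      have hfv : accD.contains v = false := hfresh v List.mem_cons_self
      have hfresh' : ∀ k ∈ t, (accD.insert v (pvStored vd td v)).contains k = false := by
        intro k hk
        rw [PySem.Dict.contains_insert]
        have hkv : k ≠ v := fun e => (List.nodup_cons.mp hnd).1 (e ▸ hk)
        have : accD.contains k = false := hfresh k (List.mem_cons_of_mem v hk)
        simp [this, hkv]
      rw [if_neg hcond]
      have hmid := ih (accD.insert v (pvStored vd td v))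
        (if v ≠ "AA" then accNE ++ [v] else accNE) hfresh' (List.nodup_cons.mp hnd).2
      refine Eq.trans hmid ?_
      rw [PySem.Dict.items_insert_of_not_contains accD (pvStored vd td v) hfv,
          List.filter_cons_of_pos (by simpa using hsrc), List.map_cons]
      congr 1
      · congr 1
        simp [List.append_assoc]
      · by_cases hAA : v = "AA"
        · rw [if_neg (by simp [hAA]), List.filter_cons_of_neg (by simp [hAA])]
        · rw [if_pos hAA, List.filter_cons_of_pos (by simp [hAA]), List.append_assoc]
          simp
    · have hcond : v ≠ "AA" ∧ vd.getD v 0 = 0 := by tauto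
      rw [if_pos hcond, List.filter_cons_of_neg (by simpa using hsrc),
        ih _ _ (fun k hk => hfresh k (List.mem_cons_of_mem v hk)) (List.nodup_cons.mp hnd).2]

-- the outer loop of B builds the same table keyed in source order
lemma pvOuterB (vd : PySem.Dict String Int) (td : PySem.Dict String (List String)) :
    ∀ (ks : List String) (acc : PySem.Dict String (PySem.Dict String Int)),
      (∀ k ∈ ks, acc.contains k = false) → ks.Nodup →
      ks.foldl
        (fun (acc : PySem.Dict String (PySem.Dict String Int)) s =>
          if s = "AA" ∨ vd.getD s 0 ≠ 0 then acc.insert s (pvS_store vd td s) else acc)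
        acc
      = PySem.Dict.mk (acc.items
          ++ (ks.filter (fun v => decide (v = "AA" ∨ vd.getD v 0 ≠ 0))).map
              (fun s => (s, pvS_store vd td s))) := by
  intro ks
  induction ks with
  | nil =>
    intro acc _ _
    simp
  | cons v t ih =>
    intro acc hfresh hnd
    rw [List.foldl_cons]
    by_cases hsrc : v = "AA" ∨ vd.getD v 0 ≠ 0
    · have hfv : acc.contains v = false := hfresh v List.mem_cons_self
      have hfresh' : ∀ k ∈ t, (acc.insert v (pvS_store vd td v)).contains k = false := by
        intro k hk
        rw [PySem.Dict.contains_insert]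
        have hkv : k ≠ v := fun e => (List.nodup_cons.mp hnd).1 (e ▸ hk)
        have : acc.contains k = false := hfresh k (List.mem_cons_of_mem v hk)
        simp [this, hkv]
      rw [if_pos hsrc]
      refine Eq.trans (ih _ hfresh' (List.nodup_cons.mp hnd).2) ?_
      rw [PySem.Dict.items_insert_of_not_contains acc _ hfv,
        List.filter_cons_of_pos (by simpa using hsrc), List.map_cons]
      congr 1
      simp [List.append_assoc]
    · rw [if_neg hsrc, List.filter_cons_of_neg (by simpa using hsrc),
        ih _ (fun k hk => hfresh k (List.mem_cons_of_mem v hk)) (List.nodup_cons.mp hnd).2]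

lemma pv_ne_filter (vd : PySem.Dict String Int) (ks : List String) :
    (ks.filter (fun v => decide (v = "AA" ∨ vd.getD v 0 ≠ 0))).filter
        (fun s => decide (s ≠ "AA"))
      = ks.filter (fun v => decide (v ≠ "AA" ∧ vd.getD v 0 ≠ 0)) := by
  rw [List.filter_filter]
  apply List.filter_congr
  intro v _
  by_cases h : v = "AA" <;> by_cases h0 : vd.getD v 0 = 0 <;> simp [h, h0]

theorem pv_ports_eq (valves : List (String × Int)) (tunnels : List (String × List String)) :
    set_distance_nonempty valves tunnels = set_distance_nonempty_alt valves tunnels := by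
  simp only [set_distance_nonempty, set_distance_nonempty_alt]
  rw [pvOuter (PySem.Dict.ofList valves) (PySem.Dict.ofList tunnels)
        (PySem.Dict.ofList valves).keys PySem.Dict.empty []
        (fun k _ => PySem.Dict.contains_empty k) (PySem.Dict.nodup_keys_ofList valves),
      pvOuterB (PySem.Dict.ofList valves) (PySem.Dict.ofList tunnels)
        (PySem.Dict.ofList valves).keys PySem.Dict.empty
        (fun k _ => PySem.Dict.contains_empty k) (PySem.Dict.nodup_keys_ofList valves)]
  rw [pv_ne_filter]
  simp only [PySem.Dict.empty, List.nil_append, List.map_map]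
  congr 1
  apply List.map_congr_left
  intro s _
  simp only [Function.comp]
  rw [pvSstore_items]

-- ===== VERDICT (by name: the statement is the Claim_ definition above) =====
theorem set_distance_nonempty_spec : Claim_equal_set_distance_nonempty := by
  intro valves tunnels _ _
  exact pv_ports_eq valves tunnels
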